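-- pv_equiv track=rewrite | github.com/Tomas-Tamantini/advent-of-code-python | models/aoc_2015/a2015_d24/packet_arrangement.py | _subgroups_of_given_size_that_add_up_to_target
-- ===== SOURCE A (Python) =====
-- from typing import Iterator
--
-- def _subgroups_of_given_size_that_add_up_to_target(
--     target: int, reverse_sorted_numbers: tuple[int], group_size: int
-- ) -> Iterator[tuple[int, ...]]:
--     if group_size == 1:
--         if target in reverse_sorted_numbers:
--             yield (target,)
--     else:
--         for i, number in enumerate(reverse_sorted_numbers):
--             if i > 0 and number == reverse_sorted_numbers[i - 1]:
--                 continue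
--             for subgroup in _subgroups_of_given_size_that_add_up_to_target(
--                 target - number, reverse_sorted_numbers[i + 1 :], group_size - 1
--             ):
--                 yield (number,) + subgroup
-- ===== SOURCE B (Python) =====
-- def _subgroups_of_given_size_that_add_up_to_target(
--     target: int, reverse_sorted_numbers, group_size: int
-- ):
--     # Iterative depth-first search with an explicit stack of
--     # (remaining target, remaining numbers, remaining size, chosen prefix)
--     # frames instead of recursive generators.
--     stack = [(target, tuple(reverse_sorted_numbers), group_size, ())]
--     while stack:
--         t, nums, size, prefix = stack.pop()
--         if size == 1:
--             if t in nums: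
--                 yield prefix + (t,)
--         else:
--             # push candidate positions in reverse so they are popped in order
--             for i in range(len(nums) - 1, -1, -1):
--                 if i > 0 and nums[i] == nums[i - 1]:
--                     continue
--                 stack.append((t - nums[i], nums[i + 1:], size - 1, prefix + (nums[i],)))
-- ===== Notes on version B (the rewrite author's own statement) =====
-- stated objective: alternative
-- what changed: B replaces A's recursive generator by an iterative depth-first search over an explicit stack of (target, remaining numbers, size, prefix) frames, pushing child frames in reverse so they pop in A's emission order.
import Mathlib
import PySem

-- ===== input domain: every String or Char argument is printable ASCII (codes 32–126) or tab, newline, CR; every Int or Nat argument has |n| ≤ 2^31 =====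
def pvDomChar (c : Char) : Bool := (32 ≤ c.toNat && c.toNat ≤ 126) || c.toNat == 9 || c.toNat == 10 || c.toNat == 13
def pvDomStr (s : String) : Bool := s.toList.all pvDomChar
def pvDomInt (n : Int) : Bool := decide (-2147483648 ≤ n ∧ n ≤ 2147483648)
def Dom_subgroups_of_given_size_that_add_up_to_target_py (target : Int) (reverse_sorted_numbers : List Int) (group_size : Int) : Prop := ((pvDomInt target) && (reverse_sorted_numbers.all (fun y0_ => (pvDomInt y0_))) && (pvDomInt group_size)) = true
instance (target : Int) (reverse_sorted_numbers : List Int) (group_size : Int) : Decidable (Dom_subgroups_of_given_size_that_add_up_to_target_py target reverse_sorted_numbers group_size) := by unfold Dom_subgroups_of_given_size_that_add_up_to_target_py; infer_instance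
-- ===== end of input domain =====

-- B replaces A's recursive generator by an iterative depth-first search over an explicit
-- stack of frames (alternative decomposition, same cost); return-value equivalence is total.

-- ===== PORT A =====
-- A's generator, materialised as the list of yielded tuples.  The inner 'for i, number in
-- enumerate(...)' loop is the helper pvA_loop: 'prev' holds reverse_sorted_numbers[i-1]
-- (none at i = 0), so 'prev = some y' is exactly 'i > 0 and number == ...[i - 1]',
-- and the current tail ys' is exactly the slice reverse_sorted_numbers[i + 1:].
mutual
def subgroups_of_given_size_that_add_up_to_target_py (target : Int) (reverse_sorted_numbers : List Int) (group_size : Int) : List (List Int) :=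
  if group_size = 1 then
    if target ∈ reverse_sorted_numbers then [[target]] else []
  else
    pvA_loop target group_size none reverse_sorted_numbers
termination_by 2 * reverse_sorted_numbers.length + 1
decreasing_by simp

def pvA_loop (target group_size : Int) (prev : Option Int) (ys : List Int) : List (List Int) :=
  match ys with
  | [] => []
  | y :: ys' =>
    (if prev = some y then []
     else (subgroups_of_given_size_that_add_up_to_target_py (target - y) ys' (group_size - 1)).map (y :: ·))
    ++ pvA_loop target group_size (some y) ys'
termination_by 2 * ys.length
decreasing_by
  all_goals simp [List.length_cons]
  all_goals omega
end

-- ===== PORT B =====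
-- A frame of Source B's stack: (remaining target, remaining numbers, remaining size, chosen prefix).
-- Source B pushes the candidate positions in REVERSE index order onto the end of a Python list and
-- pops from the end; modelling the stack head-first, that is: the children in FORWARD index
-- order, prepended.  pvB_children builds that child list (prev plays the role of nums[i-1],
-- as in pvA_loop the skip test 'i > 0 and nums[i] == nums[i - 1]' is 'prev = some y').
def pvB_children (t size : Int) (pre : List Int) (prev : Option Int) (ys : List Int) :
    List (Int × List Int × Int × List Int) :=
  match ys with
  | [] => []
  | y :: ys' =>
    (if prev = some y then [] else [(t - y, ys', size - 1, pre ++ [y])])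
    ++ pvB_children t size pre (some y) ys'

def pvFrameMeasure (fr : Int × List Int × Int × List Int) : Nat := 2 ^ (fr.2.1.length + 1)
def pvStackMeasure (st : List (Int × List Int × Int × List Int)) : Nat := (st.map pvFrameMeasure).sum

-- termination bound for pvB_run (cited in its decreasing_by)
theorem pvB_children_measure (t size : Int) (pre : List Int) (prev : Option Int) (ys : List Int) :
    pvStackMeasure (pvB_children t size pre prev ys) < 2 ^ (ys.length + 1) := by
  induction ys generalizing prev with
  | nil => simp [pvB_children, pvStackMeasure]
  | cons y ys' ih =>
    have h := ih (some y)
    have hp : 2 ^ (ys'.length + 1 + 1) = 2 ^ (ys'.length + 1) + 2 ^ (ys'.length + 1) := by ring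
    by_cases hc : prev = some y <;>
      simp [pvB_children, pvStackMeasure, pvFrameMeasure, hc, List.length_cons] at * <;> omega

-- the while-loop of Source B: pop the top frame, emit (size == 1) or push its children
def pvB_run (st : List (Int × List Int × Int × List Int)) : List (List Int) :=
  match st with
  | [] => []
  | (t, nums, size, pre) :: st' =>
    if size = 1 then
      (if t ∈ nums then [pre ++ [t]] else []) ++ pvB_run st'
    else
      pvB_run (pvB_children t size pre none nums ++ st')
termination_by pvStackMeasure st
decreasing_by
  · simp [pvStackMeasure, pvFrameMeasure]
  · have h := pvB_children_measure t size pre none nums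
    simp [pvStackMeasure, pvFrameMeasure, List.map_append, List.sum_append] at *
    omega

def subgroups_of_given_size_that_add_up_to_target_py_alt (target : Int) (reverse_sorted_numbers : List Int) (group_size : Int) : List (List Int) :=
  pvB_run [(target, reverse_sorted_numbers, group_size, [])]

-- ===== PRECONDITION & SPEC =====
def Spec_subgroups_of_given_size_that_add_up_to_target_py (target : Int) (reverse_sorted_numbers : List Int) (group_size : Int) (out : List (List Int)) : Prop := out = subgroups_of_given_size_that_add_up_to_target_py_alt target reverse_sorted_numbers group_size
instance (target : Int) (reverse_sorted_numbers : List Int) (group_size : Int) (out : List (List Int)) : Decidable (Spec_subgroups_of_given_size_that_add_up_to_target_py target reverse_sorted_numbers group_size out) := by unfold Spec_subgroups_of_given_size_that_add_up_to_target_py; infer_instance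

-- ===== CLAIM (what is proved, stated in full; the proofs are below) =====
def Claim_equal_subgroups_of_given_size_that_add_up_to_target_py : Prop := ∀ (target : Int) (reverse_sorted_numbers : List Int) (group_size : Int), Dom_subgroups_of_given_size_that_add_up_to_target_py target reverse_sorted_numbers group_size → Spec_subgroups_of_given_size_that_add_up_to_target_py target reverse_sorted_numbers group_size (subgroups_of_given_size_that_add_up_to_target_py target reverse_sorted_numbers group_size)

-- ===== LEMMAS AND PROOFS =====

-- what A would produce for one stack frame
def pvEvalFrame (fr : Int × List Int × Int × List Int) : List (List Int) :=
  (subgroups_of_given_size_that_add_up_to_target_py fr.1 fr.2.1 fr.2.2.1).map (fr.2.2.2 ++ ·)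

-- the children of a frame evaluate, frame by frame, to the inner loop of A
theorem pvB_children_eval (t size : Int) (pre : List Int) (prev : Option Int) (ys : List Int) :
    (pvB_children t size pre prev ys).flatMap pvEvalFrame
      = (pvA_loop t size prev ys).map (pre ++ ·) := by
  induction ys generalizing prev with
  | nil => simp [pvB_children, pvA_loop]
  | cons y ys' ih =>
    by_cases hc : prev = some y
    · simp only [pvB_children, pvA_loop, if_pos hc]
      simpa using ih (some y)
    · simp only [pvB_children, pvA_loop, if_neg hc]
      rw [List.flatMap_append, ih (some y)]
      simp [pvEvalFrame, List.map_map, Function.comp_def]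

-- the stack machine evaluates its stack frame by frame
theorem pvB_run_eval : ∀ (n : Nat) (st : List (Int × List Int × Int × List Int)),
    pvStackMeasure st ≤ n → pvB_run st = st.flatMap pvEvalFrame := by
  intro n
  induction n with
  | zero =>
    intro st h
    match st with
    | [] => simp [pvB_run]
    | (t, nums, size, pre) :: st' =>
      exfalso
      have : 0 < pvFrameMeasure (t, nums, size, pre) := by
        simp [pvFrameMeasure]
      simp [pvStackMeasure] at h
      omega
  | succ n ih =>
    intro st h
    match st with
    | [] => simp [pvB_run]
    | (t, nums, size, pre) :: st' =>
      have hfr : 2 ≤ pvFrameMeasure (t, nums, size, pre) := by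
        simp [pvFrameMeasure]
        exact Nat.one_lt_two_pow_iff.mpr (by omega)
      have hst : pvStackMeasure ((t, nums, size, pre) :: st')
          = pvFrameMeasure (t, nums, size, pre) + pvStackMeasure st' := by
        simp [pvStackMeasure]
      by_cases hsz : size = 1
      · rw [pvB_run]
        rw [if_pos hsz]
        rw [ih st' (by omega)]
        simp [pvEvalFrame, subgroups_of_given_size_that_add_up_to_target_py, hsz]
        by_cases hm : t ∈ nums <;> simp [hm]
      · rw [pvB_run]
        rw [if_neg hsz]
        have hch := pvB_children_measure t size pre none nums
        have hmeas : pvStackMeasure (pvB_children t size pre none nums ++ st') ≤ n := by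
          simp [pvStackMeasure, pvFrameMeasure, List.map_append, List.sum_append] at *
          omega
        rw [ih _ hmeas]
        rw [List.flatMap_append, pvB_children_eval]
        have hA : subgroups_of_given_size_that_add_up_to_target_py t nums size
            = pvA_loop t size none nums := by
          rw [subgroups_of_given_size_that_add_up_to_target_py, if_neg hsz]
        simp [List.flatMap_cons, pvEvalFrame, hA]

-- ===== VERDICT (by name: the statement is the Claim_ definition above) =====
theorem subgroups_of_given_size_that_add_up_to_target_py_spec : Claim_equal_subgroups_of_given_size_that_add_up_to_target_py := by
  intro target rsn k _
  unfold Spec_subgroups_of_given_size_that_add_up_to_target_py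
  unfold subgroups_of_given_size_that_add_up_to_target_py_alt
  rw [pvB_run_eval (pvStackMeasure [(target, rsn, k, [])]) _ le_rfl]
  simp [pvEvalFrame]
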